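-- pv_equiv track=rewrite | github.com/danielWatson3141/coderID | 2984486(small)/cainjonm/5634947029139456/0/extracted/A.py | solve
-- ===== SOURCE A (Python) =====
-- from itertools import product
-- from copy import deepcopy
--
-- def solve(wanted, have):
--     wanted.sort()
--     have.sort()
--     if (have == wanted):
--         return 0
--     best = -1
--     for bstr in product([0,1], repeat=len(have[0])):
--         havedone=deepcopy(have)
--         for bitind in range(len(bstr)):
--             if (bstr[bitind] == 1):
--                 for string in havedone:
--                     string[bitind] = 1 - string[bitind]
--         done = True
--         for blah in wanted:
--             if blah not in havedone:
--                 done = False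
--         count = bstr.count(1)
--         if done and (count < best or best == -1):
--             best = count
--     return best
-- ===== SOURCE B (Python) =====
-- def flip(row, cols):
--     """Flip (x -> 1 - x) the entries of `row` whose column index lies in `cols`."""
--     return tuple(1 - x if i in cols else x for i, x in enumerate(row))
--
--
-- def flip_columns(row, target, width):
--     """The only set of flippable columns (indices < width) whose flipping turns
--     `row` into `target`, or None if no such set exists."""
--     if len(row) != len(target):
--         return None
--     cols = frozenset(i for i, x in enumerate(row) if x != target[i])
--     if all(i < width and target[i] == 1 - row[i] for i in cols):
--         return cols
--     return None
--
--
-- def solve(wanted, have):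
--     wanted.sort()
--     have.sort()
--     if have == wanted:
--         return 0
--     if not wanted:
--         return 0
--     width = min(len(r) for r in have)  # the columns present in every row are flippable
--     w0 = wanted[0]
--     best = -1
--     seen = set()
--     for row in have:
--         # a successful flip set must send some row of `have` to w0,
--         # and per row there is at most one flip set doing that
--         cols = flip_columns(row, w0, width)
--         if cols is None or cols in seen:
--             continue
--         seen.add(cols)
--         flipped = {flip(r, cols) for r in have}
--         if all(tuple(w) in flipped for w in wanted):
--             if best == -1 or len(cols) < best:
--                 best = len(cols)
--     return best
-- ===== Notes on version B (the rewrite author's own statement) =====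
-- stated objective: faster
-- what changed: Instead of enumerating all 2^L column-flip patterns, B derives for each have-row the unique flip set of column indices that could turn it into the least wanted row (the differing positions, validated column by column) and takes the minimum size over these at most n candidates, each checked against a hashed set of flipped rows; Pre_ excludes only inputs where A raises IndexError (empty have with nonempty wanted, or a have-row shorter than the lexicographically least row).
import Mathlib
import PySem

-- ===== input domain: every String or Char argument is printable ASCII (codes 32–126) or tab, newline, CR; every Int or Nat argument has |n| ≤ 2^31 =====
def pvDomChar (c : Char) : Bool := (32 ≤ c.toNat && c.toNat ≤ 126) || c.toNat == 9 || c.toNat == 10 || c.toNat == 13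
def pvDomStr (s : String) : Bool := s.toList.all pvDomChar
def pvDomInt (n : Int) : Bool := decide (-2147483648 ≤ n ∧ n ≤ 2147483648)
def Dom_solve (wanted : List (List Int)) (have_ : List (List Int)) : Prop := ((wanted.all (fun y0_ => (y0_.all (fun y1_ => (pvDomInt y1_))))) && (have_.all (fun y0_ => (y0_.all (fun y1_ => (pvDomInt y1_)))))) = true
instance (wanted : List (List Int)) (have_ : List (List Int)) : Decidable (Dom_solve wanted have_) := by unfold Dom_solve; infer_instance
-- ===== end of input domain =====

-- B replaces A's enumeration of all 2^L column-flip patterns by the at most n candidate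
-- flip sets forced by mapping each have-row onto the least wanted row (objective: faster).
-- Both A and B sort `wanted` and `have` in place (same side effect); the equivalence is about the return value.

-- ===== PORT A =====
-- itertools.product([0,1], repeat=n), in Python's order (leftmost position varies slowest)
def pyProduct01 : Nat → List (List Int)
  | 0 => [[]]
  | n + 1 => ((pyProduct01 n).map (fun m => 0 :: m)) ++ ((pyProduct01 n).map (fun m => 1 :: m))

def solve (wanted : List (List Int)) (have_ : List (List Int)) : Int :=
  let ws := PySem.List.sorted wanted (fun x => x) false
  let hs := PySem.List.sorted have_ (fun x => x) false
  if hs == ws then 0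
  else
    -- len(have[0]): Python raises IndexError on empty `have` here; Pre_solve excludes that
    let L := (hs.headD []).length
    (pyProduct01 L).foldl (fun best bstr =>
      let havedone := (PySem.List.pyRange 0 (bstr.length : Int) 1).foldl
        (fun hd bitind =>
          if PySem.List.pyGetD bstr bitind 0 == 1 then
            hd.map (fun s => s.set bitind.toNat (1 - PySem.List.pyGetD s bitind 0))
          else hd) hs
      let done := ws.foldl (fun done blah => if !(havedone.contains blah) then false else done) true
      let count : Int := (PySem.List.count bstr 1 : Int)
      if done && (count < best || best == -1) then count else best) (-1)

-- ===== PORT B =====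
-- flip(row, cols): flip (x -> 1 - x) the entries whose column index lies in cols
def pyFlip (row : List Int) (cols : List Int) : List Int :=
  (PySem.List.enumerate row 0).map (fun p => if cols.contains p.1 then 1 - p.2 else p.2)

-- flip_columns(row, target, width): the only set of flippable columns whose flipping
-- turns row into target, or none; the frozenset of differing indices is represented by
-- the list of its elements (distinct, increasing — the order they are generated in)
def flipColumns (row target : List Int) (width : Int) : Option (List Int) :=
  if row.length ≠ target.length then none
  else
    let cols := ((PySem.List.enumerate row 0).filter
      (fun p => !(p.2 == PySem.List.pyGetD target p.1 0))).map (fun p => p.1)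
    if cols.all (fun i => decide (i < width) &&
        (PySem.List.pyGetD target i 0 == 1 - PySem.List.pyGetD row i 0)) then some cols
    else none

def solve_alt (wanted : List (List Int)) (have_ : List (List Int)) : Int :=
  let ws := PySem.List.sorted wanted (fun x => x) false
  let hs := PySem.List.sorted have_ (fun x => x) false
  if hs == ws then 0
  else
    match ws with
    | [] => 0
    | w0 :: _ =>
      -- min(len(r) for r in have): Python raises ValueError on empty `have`; Pre_solve excludes that
      let width : Int := (PySem.List.min? (hs.map (fun r => (r.length : Int))) (fun x => x)).getD 0
      (hs.foldl (fun (st : Int × PySem.Set (List Int)) row =>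
        match flipColumns row w0 width with
        | none => st
        | some cols =>
          if PySem.Set.contains st.2 cols then st
          else
            let seen' := PySem.Set.add st.2 cols
            let flipped := PySem.Set.ofList (hs.map (fun r => pyFlip r cols))
            if ws.all (fun w => PySem.Set.contains flipped w) then
              let k : Int := (cols.length : Int)
              if st.1 == -1 || k < st.1 then (k, seen') else (st.1, seen')
            else (st.1, seen')) ((-1 : Int), PySem.Set.empty)).1

-- ===== PRECONDITION & SPEC =====
-- Pre_solve excludes exactly the inputs on which A raises IndexError: an empty `have` with a
-- nonempty `wanted`, and a `have` whose lexicographically least row (have[0] after sorting) is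
-- longer than some other row — flipping then indexes past that row's end — unless the two sorted
-- lists are equal, in which case A returns 0 before touching any row.
def Pre_solve (wanted : List (List Int)) (have_ : List (List Int)) : Prop :=
  (have_ = [] → wanted = []) ∧
  (PySem.List.sorted have_ (fun x => x) false = PySem.List.sorted wanted (fun x => x) false ∨
   ∀ r ∈ have_, ((PySem.List.sorted have_ (fun x => x) false).headD []).length ≤ r.length)
instance (wanted : List (List Int)) (have_ : List (List Int)) : Decidable (Pre_solve wanted have_) := by unfold Pre_solve; infer_instance

def pvWitness_solve : List (List Int) × List (List Int) := ([[1, 0]], [[0, 0], [1, 1]])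

def Spec_solve (wanted : List (List Int)) (have_ : List (List Int)) (out : Int) : Prop := out = solve_alt wanted have_
instance (wanted : List (List Int)) (have_ : List (List Int)) (out : Int) : Decidable (Spec_solve wanted have_ out) := by unfold Spec_solve; infer_instance

-- ===== CLAIM (what is proved, stated in full; the proofs are below) =====
def Claim_equal_solve : Prop := ∀ (wanted : List (List Int)) (have_ : List (List Int)), Dom_solve wanted have_ → Pre_solve wanted have_ → Spec_solve wanted have_ (solve wanted have_)

-- ===== LEMMAS AND PROOFS =====

-- `zipflip r m` is the row `r` with entry i flipped (x ↦ 1 - x) wherever m[i] = 1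
def zipflip (r m : List Int) : List Int :=
  (r.zip m).map (fun p => if p.2 == 1 then 1 - p.1 else p.1)

-- A's per-mask in-place flipping loop, acting on a single row
def idxflip (m r : List Int) : List Int :=
  (PySem.List.pyRange 0 (m.length : Int) 1).foldl
    (fun s i => if PySem.List.pyGetD m i 0 == 1 then s.set i.toNat (1 - PySem.List.pyGetD s i 0) else s) r

def cntI (m : List Int) : Int := (PySem.List.count m 1 : Int)

def lenI (cols : List Int) : Int := (cols.length : Int)

def bstep (b c : Int) : Int := if c < b || b == -1 then c else b

def bestFold (l : List Int) : Int := l.foldl bstep (-1)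

-- "mask m works" (A's view): every wanted row occurs among the have rows with the
-- first L entries flipped at the 1-positions of m
def goodB (ws hs : List (List Int)) (L : Nat) (m : List Int) : Bool :=
  ws.all fun w => (hs.map (fun r => zipflip r m ++ List.drop L r)).contains w

-- "flip set cols works" (B's view)
def goodC (ws hs : List (List Int)) (cols : List Int) : Bool :=
  ws.all fun w => (hs.map (fun r => pyFlip r cols)).contains w

-- the set of 1-positions of a mask, as an increasing list
def colsOf (m : List Int) : List Int :=
  List.map (fun (i : Nat) => (i : Int)) (List.filter (fun i => m.getD i 0 == 1) (List.range m.length))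

-- the mask of a flip set over L columns
def maskOf (L : Nat) (cols : List Int) : List Int :=
  (List.range L).map (fun (i : Nat) => if cols.contains ((i : Int)) then 1 else 0)

-- the list of differing indices computed inside flipColumns
def candCols (row target : List Int) : List Int :=
  ((PySem.List.enumerate row 0).filter
    (fun p => !(p.2 == PySem.List.pyGetD target p.1 0))).map (fun p => p.1)

theorem zipflip_length (r m : List Int) : (zipflip r m).length = min r.length m.length := by
  simp [zipflip]

theorem zipflip_getElem? (r m : List Int) (j : Nat) :
    (zipflip r m)[j]? = match r[j]?, m[j]? with
      | some x, some b => some (if b == 1 then 1 - x else x)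
      | _, _ => none := by
  simp only [zipflip, List.getElem?_map, List.zip_eq_zipWith, List.getElem?_zipWith]
  rcases r[j]? with _ | x <;> rcases m[j]? with _ | b <;> simp

-- the outer index loop over a list of rows is a map of the index loop over one row
theorem foldl_map_if (l : List Int) (c : Int → Bool) (g : Int → List Int → List Int)
    (rows : List (List Int)) :
    l.foldl (fun hd i => if c i then hd.map (g i) else hd) rows
      = rows.map (fun r => l.foldl (fun r i => if c i then g i r else r) r) := by
  induction l generalizing rows with
  | nil => simp
  | cons i t ih =>
    simp only [List.foldl_cons]
    by_cases h : c i
    · simp only [h, if_true, ih, List.map_map]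
      rfl
    · simp [h, ih]

theorem foldl_set_getElem? (m : List Int) (l : List Int) (r : List Int)
    (hpos : ∀ i ∈ l, 0 ≤ i) (hnd : l.Nodup) (j : Nat) :
    (l.foldl (fun s i => if PySem.List.pyGetD m i 0 == 1 then s.set i.toNat (1 - PySem.List.pyGetD s i 0) else s) r)[j]?
      = if ((j : Int) ∈ l ∧ PySem.List.pyGetD m (j : Int) 0 == 1)
        then r[j]?.map (fun x => 1 - x) else r[j]? := by
  induction l generalizing r with
  | nil => simp
  | cons i t ih =>
    have hi0 : 0 ≤ i := hpos i (by simp)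
    have hnd' : t.Nodup := hnd.of_cons
    have hit : i ∉ t := (List.nodup_cons.mp hnd).1
    have hpos' : ∀ x ∈ t, 0 ≤ x := fun x hx => hpos x (by simp [hx])
    simp only [List.foldl_cons]
    rw [ih _ hpos' hnd']
    by_cases hji : (j : Int) = i
    · -- this is the step that touches position j
      have hjt : (j : Int) ∉ t := by rw [hji]; exact hit
      have hjn : i.toNat = j := by omega
      rw [if_neg (by rintro ⟨h1, _⟩; exact hjt h1)]
      by_cases hbit : (PySem.List.pyGetD m i 0 == 1) = true
      · rw [if_pos hbit, if_pos ⟨by simp [hji], by rw [hji]; exact hbit⟩]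
        rw [List.getElem?_set, hjn, if_pos rfl]
        by_cases hlt : j < r.length
        · rw [if_pos hlt, List.getElem?_eq_getElem hlt]
          have hg : PySem.List.pyGetD r i 0 = r[j] := by
            rw [← hji, PySem.List.pyGetD_natCast, List.getD_eq_getElem _ _ hlt]
          rw [hg]
          rfl
        · rw [if_neg hlt, List.getElem?_eq_none (by omega)]
          rfl
      · rw [if_neg hbit, if_neg (by rintro ⟨_, hb⟩; rw [hji] at hb; exact hbit hb)]
    · -- position j untouched by this step
      have hr' : (if (PySem.List.pyGetD m i 0 == 1) = true
          then r.set i.toNat (1 - PySem.List.pyGetD r i 0) else r)[j]? = r[j]? := by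
        split_ifs with h
        · rw [List.getElem?_set]
          have : i.toNat ≠ j := by omega
          simp [this]
        · rfl
      simp only [hr']
      by_cases hc : ((j : Int) ∈ t ∧ (PySem.List.pyGetD m (j : Int) 0 == 1) = true)
      · rw [if_pos hc, if_pos ⟨List.mem_cons.mpr (Or.inr hc.1), hc.2⟩]
      · rw [if_neg hc, if_neg (by
          rintro ⟨h1, h2⟩
          rcases List.mem_cons.mp h1 with h1 | h1
          · exact hji h1
          · exact hc ⟨h1, h2⟩)]

theorem idxflip_eq (m r : List Int) (hlen : m.length ≤ r.length) :
    idxflip m r = zipflip r m ++ List.drop m.length r := by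
  apply List.ext_getElem?
  intro j
  unfold idxflip
  rw [foldl_set_getElem? m _ r (fun i hi => (PySem.List.mem_pyRange_one.mp hi).1)
      (PySem.List.nodup_pyRange_one _ _)]
  have hzlen : (zipflip r m).length = m.length := by rw [zipflip_length]; omega
  by_cases hj : j < m.length
  · have hjr : j < r.length := by omega
    have hmemr : ((j : Int) ∈ PySem.List.pyRange 0 (m.length : Int) 1) := by
      rw [PySem.List.mem_pyRange_one]; omega
    have hget : PySem.List.pyGetD m (j : Int) 0 = m[j] := by
      rw [PySem.List.pyGetD_natCast, List.getD_eq_getElem _ _ hj]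
    rw [List.getElem?_append_left (by omega), zipflip_getElem?]
    rw [List.getElem?_eq_getElem hjr, List.getElem?_eq_getElem hj]
    by_cases hbit : (m[j] == 1) = true
    · rw [if_pos ⟨hmemr, by rw [hget]; exact hbit⟩]
      simp [hbit]
    · rw [if_neg (by rintro ⟨h1, h2⟩; rw [hget] at h2; exact hbit h2)]
      simp [hbit]
  · rw [if_neg (by rintro ⟨h1, _⟩; rw [PySem.List.mem_pyRange_one] at h1; omega)]
    rw [List.getElem?_append_right (by omega), hzlen, List.getElem?_drop]
    congr 1
    omega

theorem mem_pyProduct01 (n : Nat) (m : List Int) :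
    m ∈ pyProduct01 n ↔ m.length = n ∧ ∀ x ∈ m, x = 0 ∨ x = 1 := by
  induction n generalizing m with
  | zero =>
    constructor
    · intro h; simp [pyProduct01] at h; subst h; simp
    · rintro ⟨h, _⟩; simp [pyProduct01, List.length_eq_zero_iff.mp h]
  | succ k ih =>
    constructor
    · intro h
      simp only [pyProduct01, List.mem_append, List.mem_map] at h
      rcases h with ⟨m', hm', rfl⟩ | ⟨m', hm', rfl⟩ <;>
        · obtain ⟨hl, he⟩ := ih m' |>.mp hm'
          refine ⟨by simp [hl], ?_⟩
          intro x hx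
          rcases List.mem_cons.mp hx with rfl | hx
          · simp
          · exact he x hx
    · rintro ⟨hl, he⟩
      cases m with
      | nil => simp at hl
      | cons x xs =>
        have hx : x = 0 ∨ x = 1 := he x (by simp)
        have hxs : xs ∈ pyProduct01 k := (ih xs).mpr ⟨by simpa using hl, fun y hy => he y (by simp [hy])⟩
        simp only [pyProduct01, List.mem_append, List.mem_map]
        rcases hx with rfl | rfl
        · exact Or.inl ⟨xs, hxs, rfl⟩
        · exact Or.inr ⟨xs, hxs, rfl⟩

theorem replicate_mem_pyProduct01 (n : Nat) : (List.replicate n (0 : Int)) ∈ pyProduct01 n := by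
  rw [mem_pyProduct01]
  constructor
  · simp
  · intro x hx; left; exact (List.eq_of_mem_replicate hx)

theorem cntI_replicate_zero (n : Nat) : cntI (List.replicate n 0) = 0 := by
  simp [cntI, PySem.List.count_eq, List.count_replicate]

theorem cntI_nonneg (m : List Int) : 0 ≤ cntI m := by
  simp [cntI]

theorem lenI_nonneg (cols : List Int) : 0 ≤ lenI cols := by
  simp [lenI]

-- two strictly increasing lists with the same members are equal
theorem eq_of_pairwise_lt_of_mem_iff :
    ∀ (l1 l2 : List Int), l1.Pairwise (· < ·) → l2.Pairwise (· < ·) →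
      (∀ x, x ∈ l1 ↔ x ∈ l2) → l1 = l2 := by
  intro l1
  induction l1 with
  | nil =>
    intro l2 _ _ hmm
    cases l2 with
    | nil => rfl
    | cons b s => exact absurd ((hmm b).mpr (by simp)) (by simp)
  | cons a t ih =>
    intro l2 h1 h2 hmm
    cases l2 with
    | nil => exact absurd ((hmm a).mp (by simp)) (by simp)
    | cons b s =>
      have hat : ∀ x ∈ t, a < x := fun x hx => List.rel_of_pairwise_cons h1 hx
      have hbs : ∀ x ∈ s, b < x := fun x hx => List.rel_of_pairwise_cons h2 hx
      have hab : a = b := by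
        have h1m : a ∈ b :: s := (hmm a).mp (by simp)
        have h2m : b ∈ a :: t := (hmm b).mpr (by simp)
        rcases List.mem_cons.mp h1m with h | h
        · exact h
        · rcases List.mem_cons.mp h2m with h' | h'
          · exact h'.symm
          · have := hbs a h
            have := hat b h'
            omega
      subst hab
      have hts : ∀ x, x ∈ t ↔ x ∈ s := by
        intro x
        constructor
        · intro hx
          have hxa : a < x := hat x hx
          rcases List.mem_cons.mp ((hmm x).mp (by simp [hx])) with h | h
          · omega
          · exact h
        · intro hx
          have hxa : a < x := hbs x hx
          rcases List.mem_cons.mp ((hmm x).mpr (by simp [hx])) with h | h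
          · omega
          · exact h
      rw [ih s h1.of_cons h2.of_cons hts]

theorem mem_colsOf (m : List Int) (x : Int) :
    x ∈ colsOf m ↔ ∃ j : Nat, j < m.length ∧ x = (j : Int) ∧ m.getD j 0 = 1 := by
  unfold colsOf
  rw [List.mem_map]
  constructor
  · rintro ⟨j, hj, rfl⟩
    rw [List.mem_filter, List.mem_range] at hj
    exact ⟨j, hj.1, rfl, by simpa using hj.2⟩
  · rintro ⟨j, hj, rfl, hg⟩
    exact ⟨j, by rw [List.mem_filter, List.mem_range]; exact ⟨hj, by simpa using hg⟩, rfl⟩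

theorem pairwise_colsOf (m : List Int) : (colsOf m).Pairwise (· < ·) := by
  unfold colsOf
  rw [List.pairwise_map]
  exact (List.pairwise_lt_range.filter _).imp (by intro a b h; exact_mod_cast h)

theorem mem_candCols (row target : List Int) (x : Int) :
    x ∈ candCols row target ↔
      ∃ k : Nat, ∃ h : k < row.length, x = (k : Int) ∧ ¬ row[k] = target.getD k 0 := by
  unfold candCols
  simp only [List.mem_map, List.mem_filter, PySem.List.mem_enumerate_iff]
  constructor
  · rintro ⟨p, ⟨⟨k, hk, rfl⟩, hne⟩, rfl⟩
    refine ⟨k, hk, by simp, ?_⟩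
    simp only [Bool.not_eq_eq_eq_not, Bool.not_true, beq_eq_false_iff_ne, ne_eq] at hne
    rw [zero_add, PySem.List.pyGetD_natCast] at hne
    simpa using hne
  · rintro ⟨k, hk, rfl, hne⟩
    refine ⟨((k : Int), row[k]), ⟨⟨k, hk, by simp⟩, ?_⟩, by simp⟩
    simp only [Bool.not_eq_eq_eq_not, Bool.not_true, beq_eq_false_iff_ne, ne_eq]
    rw [PySem.List.pyGetD_natCast]
    simpa using hne

theorem pairwise_candCols (row target : List Int) : (candCols row target).Pairwise (· < ·) := by
  unfold candCols
  rw [List.pairwise_map]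
  exact ((PySem.List.pairwise_lt_enumerate row 0).filter _).imp (fun h => h)

theorem pyFlip_getElem? (row cols : List Int) (j : Nat) :
    (pyFlip row cols)[j]? = row[j]?.map (fun x => if cols.contains (j : Int) then 1 - x else x) := by
  unfold pyFlip
  rw [List.getElem?_map, PySem.List.getElem?_enumerate]
  rcases row[j]? with _ | x
  · rfl
  · simp

-- B's flip of a whole row is A's flip of the first L entries followed by the untouched tail
theorem pyFlip_colsOf_eq (m r : List Int) (hlen : m.length ≤ r.length) :
    pyFlip r (colsOf m) = zipflip r m ++ List.drop m.length r := by
  apply List.ext_getElem?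
  intro j
  rw [pyFlip_getElem?]
  have hzlen : (zipflip r m).length = m.length := by rw [zipflip_length]; omega
  have hcont : ((colsOf m).contains (j : Int)) = (decide (j < m.length) && (m.getD j 0 == 1)) := by
    by_cases h1 : j < m.length
    · by_cases h2 : m.getD j 0 = 1
      · rw [List.contains_iff_mem.mpr ((mem_colsOf m _).mpr ⟨j, h1, rfl, h2⟩)]
        have h2' : m[j] = 1 := by rw [← List.getD_eq_getElem m 0 h1]; exact h2
        simp [h1, h2']
      · have hnm : (j : Int) ∉ colsOf m := by
          intro hm
          obtain ⟨k, hk, hkj, hg⟩ := (mem_colsOf m _).mp hm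
          have hkj' : k = j := by exact_mod_cast hkj.symm
          exact h2 (hkj' ▸ hg)
        have hcf : (colsOf m).contains (j : Int) = false := by
          rw [← Bool.not_eq_true, List.contains_iff_mem]; exact hnm
        rw [hcf]
        have hb : (m.getD j 0 == 1) = false := by simpa using h2
        rw [hb, Bool.and_false]
    · have hnm : (j : Int) ∉ colsOf m := by
        intro hm
        obtain ⟨k, hk, hkj, _⟩ := (mem_colsOf m _).mp hm
        have hkj' : k = j := by exact_mod_cast hkj.symm
        omega
      have hcf : (colsOf m).contains (j : Int) = false := by
        rw [← Bool.not_eq_true, List.contains_iff_mem]; exact hnm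
      rw [hcf]
      simp [h1]
  rw [hcont]
  by_cases hj : j < m.length
  · have hjr : j < r.length := by omega
    rw [List.getElem?_append_left (by omega), zipflip_getElem?]
    rw [List.getElem?_eq_getElem hjr, List.getElem?_eq_getElem hj]
    rw [List.getD_eq_getElem _ _ hj]
    by_cases hbit : (m[j] == 1) = true
    · simp [hj, hbit]
    · have hbf : (m[j] == 1) = false := by simpa using hbit
      simp [hj, hbf]
  · rw [List.getElem?_append_right (by omega), hzlen, List.getElem?_drop]
    have hjf : (j < m.length) = False := by simp [hj]
    simp only [hjf, decide_false, Bool.false_and, if_false]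
    have hadd : m.length + (j - m.length) = j := by omega
    rw [hadd]
    rcases r[j]? with _ | x <;> simp

theorem filter_range_length_count : ∀ (m : List Int),
    (List.filter (fun i => m.getD i 0 == 1) (List.range m.length)).length = m.count 1 := by
  intro m
  induction m with
  | nil => simp
  | cons a t ih =>
    have hcomp : ((fun i => (a :: t).getD i 0 == 1) ∘ Nat.succ) = (fun i => t.getD i 0 == 1) := by
      funext i
      simp [Function.comp]
    rw [List.length_cons, List.range_succ_eq_map, List.filter_cons, List.filter_map, hcomp]
    by_cases h : (a == 1) = true
    · have hc0 : ((a :: t).getD 0 0 == 1) = true := by simpa using h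
      simp only [hc0, if_true, List.length_cons, List.length_map, ih, List.count_cons, h]
    · have hc0 : ((a :: t).getD 0 0 == 1) = false := by simpa using h
      have hf : (a == 1) = false := by simpa using h
      simp only [hc0, Bool.false_eq_true, if_false, List.length_map, ih, List.count_cons, hf]
      omega

theorem lenI_colsOf (m : List Int) : lenI (colsOf m) = cntI m := by
  unfold lenI colsOf cntI
  rw [List.length_map, PySem.List.count_eq]
  congr 1
  exact filter_range_length_count m

theorem length_maskOf (L : Nat) (cols : List Int) : (maskOf L cols).length = L := by
  simp [maskOf]

theorem entries_maskOf (L : Nat) (cols : List Int) : ∀ x ∈ maskOf L cols, x = 0 ∨ x = 1 := by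
  intro x hx
  obtain ⟨i, _, rfl⟩ := List.mem_map.mp hx
  by_cases h : cols.contains ((i : Int)) = true
  · right; rw [if_pos h]
  · left; rw [if_neg h]

theorem getD_maskOf (L : Nat) (cols : List Int) (j : Nat) (hj : j < L) :
    (maskOf L cols).getD j 0 = if cols.contains (j : Int) then 1 else 0 := by
  unfold maskOf
  rw [List.getD_eq_getElem _ _ (by simp [hj])]
  simp

theorem colsOf_maskOf (L : Nat) (cols : List Int)
    (hmem : ∀ x ∈ cols, 0 ≤ x ∧ x < (L : Int)) (hpw : cols.Pairwise (· < ·)) :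
    colsOf (maskOf L cols) = cols := by
  apply eq_of_pairwise_lt_of_mem_iff _ _ (pairwise_colsOf _) hpw
  intro x
  rw [mem_colsOf]
  constructor
  · rintro ⟨j, hj, rfl, hg⟩
    rw [length_maskOf] at hj
    rw [getD_maskOf L cols j hj] at hg
    by_cases h : cols.contains (j : Int) = true
    · exact List.contains_iff_mem.mp h
    · rw [if_neg h] at hg
      exact absurd hg (by norm_num)
  · intro hx
    obtain ⟨h0, hL⟩ := hmem x hx
    refine ⟨x.toNat, by rw [length_maskOf]; omega, by omega, ?_⟩
    rw [getD_maskOf L cols x.toNat (by omega)]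
    rw [if_pos (List.contains_iff_mem.mpr (by rwa [show ((x.toNat : Nat) : Int) = x by omega]))]

theorem bstep_neg_one (c : Int) : bstep (-1) c = c := by
  simp [bstep]

theorem bstep_nonneg (b c : Int) (hb : 0 ≤ b) : bstep b c = min b c := by
  unfold bstep
  have hb1 : (b == -1) = false := by simp; omega
  rw [hb1]
  by_cases h : c < b
  · simp [h]; omega
  · simp [h]; omega

theorem foldl_bstep_eq_min (l : List Int) : ∀ b, 0 ≤ b → (∀ c ∈ l, 0 ≤ c) →
    l.foldl bstep b = l.foldl min b := by
  induction l with
  | nil => intro b _ _; rfl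
  | cons c t ih =>
    intro b hb hc
    simp only [List.foldl_cons]
    rw [bstep_nonneg b c hb]
    exact ih _ (le_min hb (hc c (by simp))) (fun x hx => hc x (by simp [hx]))

theorem bestFold_spec (l : List Int) (h : ∀ c ∈ l, 0 ≤ c) :
    l = [] ∨ (bestFold l ∈ l ∧ ∀ c ∈ l, bestFold l ≤ c) := by
  cases l with
  | nil => left; rfl
  | cons c t =>
    right
    have hc0 : 0 ≤ c := h c (by simp)
    have hbf : bestFold (c :: t) = t.foldl min c := by
      unfold bestFold
      simp only [List.foldl_cons, bstep_neg_one]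
      exact foldl_bstep_eq_min t c hc0 (fun x hx => h x (by simp [hx]))
    rw [hbf]
    constructor
    · rcases PySem.List.foldl_min_mem t c with heq | hmem
      · rw [heq]; simp
      · simp [hmem]
    · intro x hx
      rcases List.mem_cons.mp hx with h1 | h1
      · rw [h1]; exact (PySem.List.foldl_min_le t c).1
      · exact (PySem.List.foldl_min_le t c).2 x h1

theorem bestFold_le_of_mem (l : List Int) (h : ∀ c ∈ l, 0 ≤ c) (x : Int) (hx : x ∈ l) :
    0 ≤ bestFold l ∧ bestFold l ≤ x := by
  rcases bestFold_spec l h with rfl | ⟨hmem, hle⟩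
  · simp at hx
  · exact ⟨h _ hmem, hle x hx⟩

theorem bestFold_append (l : List Int) (c : Int) :
    bestFold (l ++ [c]) = bstep (bestFold l) c := by
  unfold bestFold
  rw [List.foldl_append]
  rfl

theorem bstep_of_mem (l : List Int) (h : ∀ c ∈ l, 0 ≤ c) (x : Int) (hx : x ∈ l) :
    bstep (bestFold l) x = bestFold l := by
  obtain ⟨h0, hle⟩ := bestFold_le_of_mem l h x hx
  unfold bstep
  rw [if_neg]
  simp
  omega

theorem bestFold_eq_of_mem_iff (l1 l2 : List Int) (h1 : ∀ c ∈ l1, 0 ≤ c) (h2 : ∀ c ∈ l2, 0 ≤ c)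
    (hmm : ∀ x, x ∈ l1 ↔ x ∈ l2) : bestFold l1 = bestFold l2 := by
  rcases bestFold_spec l1 h1 with rfl | ⟨hm1, hle1⟩
  · rcases bestFold_spec l2 h2 with rfl | ⟨hm2, _⟩
    · rfl
    · exact absurd ((hmm _).mpr hm2) (by simp)
  · rcases bestFold_spec l2 h2 with rfl | ⟨hm2, hle2⟩
    · exact absurd ((hmm _).mp hm1) (by simp)
    · exact le_antisymm (hle1 _ ((hmm _).mpr hm2)) (hle2 _ ((hmm _).mp hm1))

theorem bestFold_nil : bestFold [] = -1 := rfl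

theorem contains_ofList {α : Type} [BEq α] [LawfulBEq α] (l : List α) (x : α) :
    PySem.Set.contains (PySem.Set.ofList l) x = l.contains x := by
  unfold PySem.Set.contains
  by_cases h : x ∈ l
  · rw [List.contains_iff_mem.mpr h,
      List.contains_iff_mem.mpr ((PySem.Set.mem_ofList l x).mpr h)]
  · have h1 : l.contains x = false := by
      rw [← Bool.not_eq_true, List.contains_iff_mem]; exact h
    have h2 : List.contains (PySem.Set.ofList l) x = false := by
      rw [← Bool.not_eq_true, List.contains_iff_mem]
      intro hm
      exact h ((PySem.Set.mem_ofList l x).mp hm)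
    rw [h1, h2]

theorem val_map_nonneg (l : List (List Int)) (g : List Int → Bool) (v : List Int → Int)
    (hv : ∀ m, 0 ≤ v m) : ∀ c ∈ (l.filter g).map v, 0 ≤ c := by
  intro c hc
  obtain ⟨m, _, rfl⟩ := List.mem_map.mp hc
  exact hv m

-- A's mask loop computes the best count over the successful masks
theorem A_fold_eq (ws hs : List (List Int)) (L : Nat) (hL : ∀ r ∈ hs, L ≤ r.length) :
    (pyProduct01 L).foldl (fun best bstr =>
      if (ws.foldl (fun done blah =>
            if !(((PySem.List.pyRange 0 (bstr.length : Int) 1).foldl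
              (fun hd bitind =>
                if PySem.List.pyGetD bstr bitind 0 == 1 then
                  hd.map (fun s => s.set bitind.toNat (1 - PySem.List.pyGetD s bitind 0))
                else hd) hs).contains blah) then false else done) true)
          && ((PySem.List.count bstr 1 : Int) < best || best == -1)
      then (PySem.List.count bstr 1 : Int) else best) (-1)
    = bestFold (((pyProduct01 L).filter (goodB ws hs L)).map cntI) := by
  rw [PySem.List.foldl_congr_mem (pyProduct01 L) _
    (fun best m => if goodB ws hs L m then bstep best (cntI m) else best) (-1) ?hcong]
  · rw [PySem.List.foldl_ite_eq_foldl_filter (fun m => goodB ws hs L m = true)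
      (fun b m => bstep b (cntI m))]
    · unfold bestFold
      rw [List.foldl_map]
      congr 1
      apply List.filter_congr
      intro m _
      simp
  case hcong =>
    intro acc m hm
    obtain ⟨hmlen, _⟩ := (mem_pyProduct01 L m).mp hm
    have hhd : (PySem.List.pyRange 0 (m.length : Int) 1).foldl
        (fun hd bitind =>
          if PySem.List.pyGetD m bitind 0 == 1 then
            hd.map (fun s => s.set bitind.toNat (1 - PySem.List.pyGetD s bitind 0))
          else hd) hs = hs.map (fun r => zipflip r m ++ List.drop L r) := by
      rw [foldl_map_if _ (fun i => PySem.List.pyGetD m i 0 == 1)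
        (fun i s => s.set i.toNat (1 - PySem.List.pyGetD s i 0)) hs]
      apply List.map_congr_left
      intro r hr
      have h := idxflip_eq m r (by rw [hmlen]; exact hL r hr)
      rw [hmlen] at h
      exact h
    rw [hhd]
    rw [PySem.List.foldl_if_false_eq
      (fun blah => !((hs.map (fun r => zipflip r m ++ List.drop L r)).contains blah)) ws true]
    have hdone : (true && !(ws.any fun blah =>
        !((hs.map (fun r => zipflip r m ++ List.drop L r)).contains blah))) = goodB ws hs L m := by
      unfold goodB
      rw [Bool.true_and, ← List.all_eq_not_any_not]
    rw [hdone]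
    show _ = if goodB ws hs L m = true then bstep acc (cntI m) else acc
    by_cases hg : goodB ws hs L m = true
    · rw [hg, if_pos rfl]
      simp only [Bool.true_and]
      rfl
    · have hgf : goodB ws hs L m = false := by simpa using hg
      rw [hgf]
      simp

-- B's row loop computes the best size over the successful candidate flip sets
theorem B_fold_eq (ws hs : List (List Int)) (w0 : List Int) (width : Int) :
    ∀ (rows cs : List (List Int)),
    rows.foldl (fun (st : Int × PySem.Set (List Int)) row =>
        match flipColumns row w0 width with
        | none => st
        | some cols =>
          if PySem.Set.contains st.2 cols then st
          else
            if ws.all (fun w => PySem.Set.contains (PySem.Set.ofList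
                (hs.map (fun r => pyFlip r cols))) w) then
              if st.1 == -1 || (cols.length : Int) < st.1 then
                ((cols.length : Int), PySem.Set.add st.2 cols)
              else (st.1, PySem.Set.add st.2 cols)
            else (st.1, PySem.Set.add st.2 cols))
      (bestFold ((cs.filter (goodC ws hs)).map lenI), PySem.Set.ofList cs)
    = (bestFold (((cs ++ rows.filterMap (fun row => flipColumns row w0 width)).filter (goodC ws hs)).map lenI),
       PySem.Set.ofList (cs ++ rows.filterMap (fun row => flipColumns row w0 width))) := by
  intro rows
  induction rows with
  | nil => intro cs; simp
  | cons row rest ih =>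
    intro cs
    simp only [List.foldl_cons, List.filterMap_cons]
    cases hfm : flipColumns row w0 width with
    | none => exact ih cs
    | some cols =>
      dsimp only
      have happ : ∀ X : List (List Int), cs ++ cols :: X = (cs ++ [cols]) ++ X := by
        intro X; simp
      have hofs_add : PySem.Set.add (PySem.Set.ofList cs) cols = PySem.Set.ofList (cs ++ [cols]) := by
        rw [PySem.Set.ofList_eq_foldl (cs ++ [cols]), List.foldl_append, ← PySem.Set.ofList_eq_foldl]
        rfl
      by_cases hmem : cols ∈ cs
      · have hcont : PySem.Set.contains (PySem.Set.ofList cs) cols = true := by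
          rw [contains_ofList, List.contains_iff_mem]; exact hmem
        rw [if_pos hcont]
        have hofs : PySem.Set.ofList (cs ++ [cols]) = PySem.Set.ofList cs := by
          rw [← hofs_add]
          unfold PySem.Set.add
          rw [if_pos hcont]
        have hbf : bestFold (((cs ++ [cols]).filter (goodC ws hs)).map lenI)
            = bestFold ((cs.filter (goodC ws hs)).map lenI) := by
          rw [List.filter_append]
          by_cases hg : goodC ws hs cols = true
          · rw [List.filter_cons_of_pos hg, List.filter_nil, List.map_append, List.map_cons, List.map_nil]
            rw [bestFold_append]
            exact bstep_of_mem _ (val_map_nonneg cs _ _ lenI_nonneg) _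
              (List.mem_map.mpr ⟨cols, List.mem_filter.mpr ⟨hmem, hg⟩, rfl⟩)
          · rw [List.filter_cons_of_neg (by simpa using hg), List.filter_nil, List.append_nil]
        have := ih (cs ++ [cols])
        rw [hbf, hofs] at this
        rw [happ]
        exact this
      · have hcont : PySem.Set.contains (PySem.Set.ofList cs) cols = false := by
          rw [contains_ofList, ← Bool.not_eq_true, List.contains_iff_mem]; exact hmem
        rw [if_neg (by rw [hcont]; simp)]
        have hflip : (ws.all fun w => PySem.Set.contains (PySem.Set.ofList
            (hs.map (fun r => pyFlip r cols))) w) = goodC ws hs cols := by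
          unfold goodC
          simp only [contains_ofList]
        rw [hflip]
        have hbfstep : bestFold (((cs ++ [cols]).filter (goodC ws hs)).map lenI)
            = if goodC ws hs cols then bstep (bestFold ((cs.filter (goodC ws hs)).map lenI)) (lenI cols)
              else bestFold ((cs.filter (goodC ws hs)).map lenI) := by
          rw [List.filter_append]
          by_cases hg : goodC ws hs cols = true
          · rw [List.filter_cons_of_pos hg, List.filter_nil, List.map_append, List.map_cons, List.map_nil,
              bestFold_append, if_pos hg]
          · rw [List.filter_cons_of_neg (by simpa using hg), List.filter_nil, List.append_nil,
              if_neg (by simpa using hg)]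
        have hstate : (if goodC ws hs cols = true then
              if (bestFold ((cs.filter (goodC ws hs)).map lenI) == -1
                  || (cols.length : Int) < bestFold ((cs.filter (goodC ws hs)).map lenI)) then
                ((cols.length : Int), PySem.Set.add (PySem.Set.ofList cs) cols)
              else (bestFold ((cs.filter (goodC ws hs)).map lenI), PySem.Set.add (PySem.Set.ofList cs) cols)
            else (bestFold ((cs.filter (goodC ws hs)).map lenI), PySem.Set.add (PySem.Set.ofList cs) cols))
          = (bestFold (((cs ++ [cols]).filter (goodC ws hs)).map lenI), PySem.Set.ofList (cs ++ [cols])) := by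
          rw [hbfstep, ← hofs_add]
          by_cases hg : goodC ws hs cols = true
          · rw [if_pos hg, if_pos hg]
            unfold bstep lenI
            rw [Bool.or_comm]
            split
            · rfl
            · rfl
          · rw [if_neg hg, if_neg hg]
        rw [hstate]
        have := ih (cs ++ [cols])
        rw [happ (List.filterMap (fun row => flipColumns row w0 width) rest)]
        exact this

-- a value is achieved by a successful mask iff it is achieved by a successful candidate flip set
theorem val_mem_iff (ws hs : List (List Int)) (w0 : List Int) (hw0 : w0 ∈ ws) (L : Nat)
    (hL : ∀ r ∈ hs, L ≤ r.length) (x : Int) :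
    x ∈ (((pyProduct01 L).filter (goodB ws hs L)).map cntI) ↔
    x ∈ (((hs.filterMap (fun row => flipColumns row w0 (L : Int))).filter (goodC ws hs)).map lenI) := by
  have hgood_eq : ∀ m : List Int, m.length = L → goodC ws hs (colsOf m) = goodB ws hs L m := by
    intro m hmlen
    unfold goodC goodB
    have : hs.map (fun r => pyFlip r (colsOf m)) = hs.map (fun r => zipflip r m ++ List.drop L r) := by
      apply List.map_congr_left
      intro r hr
      have h := pyFlip_colsOf_eq m r (by rw [hmlen]; exact hL r hr)
      rw [hmlen] at h
      exact h
    rw [this]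
  constructor
  · intro hx
    obtain ⟨m, hmf, rfl⟩ := List.mem_map.mp hx
    obtain ⟨hmm, hg⟩ := List.mem_filter.mp hmf
    obtain ⟨hmlen, hment⟩ := (mem_pyProduct01 L m).mp hmm
    -- the successful mask maps some row onto w0
    have hc : (hs.map (fun r => zipflip r m ++ List.drop L r)).contains w0 = true :=
      List.all_eq_true.mp hg w0 hw0
    obtain ⟨row, hrow, hzip⟩ := List.mem_map.mp (List.contains_iff_mem.mp hc)
    have hrl : L ≤ row.length := hL row hrow
    have hzl : (zipflip row m).length = L := by rw [zipflip_length]; omega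
    have hw0len : w0.length = row.length := by
      rw [← hzip, List.length_append, hzl, List.length_drop]
      omega
    -- w0's entries, via hzip
    have hw0get : ∀ k : Nat, (hk : k < row.length) →
        w0.getD k 0 = if k < L then (if m.getD k 0 = 1 then 1 - row[k] else row[k]) else row[k] := by
      intro k hk
      have hkw : k < w0.length := by omega
      have hw0k : (zipflip row m ++ List.drop L row)[k]? = some (w0.getD k 0) := by
        rw [hzip, List.getElem?_eq_getElem hkw, List.getD_eq_getElem _ _ hkw]
      by_cases hkL : k < L
      · rw [List.getElem?_append_left (by omega), zipflip_getElem?,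
          List.getElem?_eq_getElem hk, List.getElem?_eq_getElem (by omega : k < m.length)] at hw0k
        have hgd : m.getD k 0 = m[k] := List.getD_eq_getElem _ _ (by omega)
        rw [if_pos hkL, hgd]
        by_cases hb : (m[k] == 1) = true
        · have hm1 : m[k] = 1 := by simpa using hb
          rw [if_pos hm1]
          simp only [hb, if_true] at hw0k
          exact (Option.some_inj.mp hw0k).symm
        · have hm1 : ¬ m[k] = 1 := by simpa using hb
          have hbf : (m[k] == 1) = false := by simpa using hb
          rw [if_neg hm1]
          simp only [hbf, Bool.false_eq_true, if_false] at hw0k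
          exact (Option.some_inj.mp hw0k).symm
      · rw [List.getElem?_append_right (by omega), hzl, List.getElem?_drop] at hw0k
        have hLk : L + (k - L) = k := by omega
        rw [hLk, List.getElem?_eq_getElem hk] at hw0k
        rw [if_neg hkL]
        exact (Option.some_inj.mp hw0k).symm
    -- flipColumns on that row yields exactly colsOf m
    have hcand : candCols row w0 = colsOf m := by
      apply eq_of_pairwise_lt_of_mem_iff _ _ (pairwise_candCols row w0) (pairwise_colsOf m)
      intro y
      rw [mem_candCols, mem_colsOf]
      constructor
      · rintro ⟨k, hk, rfl, hne⟩
        rw [hw0get k hk] at hne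
        by_cases hkL : k < L
        · rw [if_pos hkL] at hne
          refine ⟨k, by omega, rfl, ?_⟩
          by_cases hg1 : m.getD k 0 = 1
          · exact hg1
          · rw [if_neg hg1] at hne
            exact absurd rfl hne
        · rw [if_neg hkL] at hne
          exact absurd rfl hne
      · rintro ⟨j, hj, rfl, hg1⟩
        have hjr : j < row.length := by omega
        refine ⟨j, hjr, rfl, ?_⟩
        rw [hw0get j hjr, if_pos (by omega), if_pos hg1]
        intro h
        omega
    have hvalid : (candCols row w0).all (fun i => decide (i < (L : Int)) &&
        (PySem.List.pyGetD w0 i 0 == 1 - PySem.List.pyGetD row i 0)) = true := by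
      rw [List.all_eq_true]
      intro i hi
      rw [hcand] at hi
      obtain ⟨j, hj, rfl, hg1⟩ := (mem_colsOf m _).mp hi
      have hjL : j < L := by omega
      have hjr : j < row.length := by omega
      rw [PySem.List.pyGetD_natCast, PySem.List.pyGetD_natCast]
      simp only [Bool.and_eq_true, decide_eq_true_eq, beq_iff_eq]
      constructor
      · exact_mod_cast hjL
      · rw [hw0get j hjr, if_pos hjL, if_pos hg1, List.getD_eq_getElem _ _ hjr]
    have hfc : flipColumns row w0 (L : Int) = some (colsOf m) := by
      unfold flipColumns
      rw [if_neg (by omega)]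
      show (if (candCols row w0).all _ then some (candCols row w0) else none) = _
      rw [if_pos hvalid, hcand]
    refine List.mem_map.mpr ⟨colsOf m, List.mem_filter.mpr
      ⟨List.mem_filterMap.mpr ⟨row, hrow, hfc⟩, by rw [hgood_eq m hmlen]; exact hg⟩,
      (lenI_colsOf m).symm ▸ rfl⟩
  · intro hx
    obtain ⟨cols, hcf, rfl⟩ := List.mem_map.mp hx
    obtain ⟨hcm, hg⟩ := List.mem_filter.mp hcf
    obtain ⟨row, hrow, hfc⟩ := List.mem_filterMap.mp hcm
    -- unpack flipColumns
    unfold flipColumns at hfc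
    by_cases hlen : row.length ≠ w0.length
    · rw [if_pos hlen] at hfc
      exact absurd hfc (by simp)
    rw [if_neg hlen] at hfc
    by_cases hvalid : (candCols row w0).all (fun i => decide (i < (L : Int)) &&
        (PySem.List.pyGetD w0 i 0 == 1 - PySem.List.pyGetD row i 0)) = true
    case neg =>
      exfalso
      have hcontra : (if (candCols row w0).all (fun i => decide (i < (L : Int)) &&
          (PySem.List.pyGetD w0 i 0 == 1 - PySem.List.pyGetD row i 0)) then
          some (candCols row w0) else none) = some cols := hfc
      rw [if_neg hvalid] at hcontra
      simp at hcontra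
    case pos =>
      have hcols : cols = candCols row w0 := by
        have : (if (candCols row w0).all (fun i => decide (i < (L : Int)) &&
            (PySem.List.pyGetD w0 i 0 == 1 - PySem.List.pyGetD row i 0)) then
            some (candCols row w0) else none) = some cols := hfc
        rw [if_pos hvalid] at this
        exact (Option.some_inj.mp this).symm
      subst hcols
      have hmemrange : ∀ y ∈ candCols row w0, 0 ≤ y ∧ y < (L : Int) := by
        intro y hy
        obtain ⟨k, hk, rfl, _⟩ := (mem_candCols row w0 y).mp hy
        have := List.all_eq_true.mp hvalid _ hy
        simp only [Bool.and_eq_true, decide_eq_true_eq] at this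
        exact ⟨by omega, this.1⟩
      set m := maskOf L (candCols row w0) with hm
      have hmlen : m.length = L := length_maskOf _ _
      have hcolsOf : colsOf m = candCols row w0 :=
        colsOf_maskOf L _ hmemrange (pairwise_candCols row w0)
      have hmm : m ∈ pyProduct01 L :=
        (mem_pyProduct01 L m).mpr ⟨hmlen, entries_maskOf L _⟩
      have hgB : goodB ws hs L m = true := by
        rw [← hgood_eq m hmlen, hcolsOf]
        exact hg
    -- value equality: |cols| = count of 1s in m
      have hval : lenI (candCols row w0) = cntI m := by
        rw [← hcolsOf, lenI_colsOf]
      exact List.mem_map.mpr ⟨m, List.mem_filter.mpr ⟨hmm, hgB⟩, by rw [← hval]⟩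

theorem ofList_nil_int : PySem.Set.ofList ([] : List (List Int)) = PySem.Set.empty := rfl

theorem solve_spec : Claim_equal_solve := by
  unfold Claim_equal_solve
  intro wanted have_ _ hpre
  obtain ⟨hemp, hdisj⟩ := hpre
  unfold Spec_solve solve solve_alt
  dsimp only
  by_cases heq : (PySem.List.sorted have_ (fun x => x) false == PySem.List.sorted wanted (fun x => x) false) = true
  · rw [if_pos heq, if_pos heq]
  · rw [if_neg heq, if_neg heq]
    have hsne : ¬ (PySem.List.sorted have_ (fun x => x) false = PySem.List.sorted wanted (fun x => x) false) := by
      intro h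
      exact heq (beq_iff_eq.mpr h)
    have hlen' := hdisj.resolve_left hsne
    set hs := PySem.List.sorted have_ (fun x => x) false with hhs
    set ws := PySem.List.sorted wanted (fun x => x) false with hws
    have hL : ∀ r ∈ hs, (hs.headD []).length ≤ r.length := by
      intro r hr
      exact hlen' r ((PySem.List.mem_sorted have_ (fun x => x) false r).mp hr)
    rw [A_fold_eq ws hs _ hL]
    cases hwsl : ws with
    | nil =>
      dsimp only
      have hgt : ∀ m ∈ pyProduct01 (hs.headD []).length, goodB [] hs (hs.headD []).length m = true :=
        fun m _ => rfl
      rw [List.filter_eq_self.mpr hgt]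
      have hnn : ∀ c ∈ (pyProduct01 (hs.headD []).length).map cntI, 0 ≤ c := by
        intro c hc
        obtain ⟨m, _, rfl⟩ := List.mem_map.mp hc
        exact cntI_nonneg m
      have hmem0 : (0 : Int) ∈ (pyProduct01 (hs.headD []).length).map cntI :=
        List.mem_map.mpr ⟨List.replicate _ 0, replicate_mem_pyProduct01 _, cntI_replicate_zero _⟩
      have h0 := bestFold_le_of_mem _ hnn 0 hmem0
      omega
    | cons w0 wt =>
      dsimp only
      -- `have_`, hence `hs`, is nonempty here
      have hhsne : hs ≠ [] := by
        intro h0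
        apply heq
        have hwnil : wanted = [] := by
          apply hemp
          cases hc : have_ with
          | nil => rfl
          | cons a t =>
            exfalso
            have ha : a ∈ hs := (PySem.List.mem_sorted have_ (fun x => x) false a).mpr (by rw [hc]; simp)
            rw [h0] at ha
            simp at ha
        have : ws = [] := by
          cases hc : ws with
          | nil => rfl
          | cons a t =>
            exfalso
            have ha : a ∈ wanted := (PySem.List.mem_sorted wanted (fun x => x) false a).mp
              (by rw [← hws, hc]; simp)
            rw [hwnil] at ha
            simp at ha
        rw [h0, this]
        rfl
      -- the minimum row width equals A's L
      have hwidth : (PySem.List.min? (hs.map (fun r => (r.length : Int))) (fun x => x)).getD 0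
          = ((hs.headD []).length : Int) := by
        cases hmin : PySem.List.min? (hs.map (fun r => (r.length : Int))) (fun x => x) with
        | none =>
          exfalso
          have := (PySem.List.min?_eq_none_iff (hs.map (fun r => (r.length : Int))) (fun x => x)).mp hmin
          rw [List.map_eq_nil_iff] at this
          exact hhsne this
        | some v =>
          have hvm : v ∈ hs.map (fun r => (r.length : Int)) := PySem.List.min?_mem hmin
          obtain ⟨r, hr, rfl⟩ := List.mem_map.mp hvm
          have h1 : ((hs.headD []).length : Int) ≤ (r.length : Int) := by
            exact_mod_cast hL r hr
          have hhd : ((hs.headD []).length : Int) ∈ hs.map (fun r => (r.length : Int)) := by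
            apply List.mem_map.mpr
            refine ⟨hs.headD [], ?_, rfl⟩
            cases hc : hs with
            | nil => exact absurd hc hhsne
            | cons a t => simp
          have h2 : (fun x => x) ((r.length : Int)) ≤ (fun x => x) ((hs.headD []).length : Int) :=
            PySem.List.min?_isMin hmin _ hhd
          simp only [Option.getD_some]
          exact le_antisymm h2 h1
      rw [hwidth]
      have hB := B_fold_eq (w0 :: wt) hs w0 (((hs.headD []).length : Int)) hs []
      simp only [List.filter_nil, List.map_nil, List.nil_append, bestFold_nil, ofList_nil_int] at hB
      rw [hB]
      apply bestFold_eq_of_mem_iff _ _ (val_map_nonneg _ _ _ cntI_nonneg) (val_map_nonneg _ _ _ lenI_nonneg)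
      intro x
      exact val_mem_iff (w0 :: wt) hs w0 (by simp) _ hL x
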